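-- pv_equiv track=rewrite | github.com/SongY123/SpatialText2SQL | scripts/compute_source_stats.py | collapse_lat_lon
-- ===== SOURCE A (Python) =====
-- SPATIAL_HINTS = (
--     "the_geom",
--     "geom",
--     "geometry",
--     "shape",
--     "latitude",
--     "longitude",
--     "lat",
--     "lon",
--     "point_x",
--     "point_y",
--     "x_coord",
--     "y_coord",
-- )
--
-- def is_spatial_col(name: str) -> bool:
--     lower = name.strip().lower()
--     return any(hint == lower or hint in lower for hint in SPATIAL_HINTS)
--
-- def collapse_lat_lon(columns: list[str]) -> tuple[int, int]:
--     lowered = [col.strip().lower() for col in columns]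
--     total_fields = len(columns)
--     spatial_fields = sum(1 for col in columns if is_spatial_col(col))
--
--     has_lat = any(col in {"lat", "latitude"} for col in lowered)
--     has_lon = any(col in {"lon", "lng", "longitude"} for col in lowered)
--     if has_lat and has_lon:
--         total_fields -= 1
--         spatial_fields -= 1
--
--     return max(total_fields, 0), max(spatial_fields, 0)
-- ===== SOURCE B (Python) =====
-- SPATIAL_HINTS = (
--     "the_geom",
--     "geom",
--     "geometry",
--     "shape",
--     "latitude",
--     "longitude",
--     "lat",
--     "lon",
--     "point_x",
--     "point_y",
--     "x_coord",
--     "y_coord",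
-- )
--
-- _HINT_SET = frozenset(SPATIAL_HINTS)
-- _HINT_LENGTHS = (3, 4, 5, 7, 8, 9)  # = sorted({len(h) for h in SPATIAL_HINTS})
--
--
-- def _has_spatial_hint(s: str) -> bool:
--     # text-side matching: slide a window of each hint length over s and
--     # look the window up in the hint set (instead of searching s for each hint)
--     for L in _HINT_LENGTHS:
--         for i in range(len(s) - L + 1):
--             if s[i:i + L] in _HINT_SET:
--                 return True
--     return False
--
--
-- def collapse_lat_lon(columns: list[str]) -> tuple[int, int]:
--     norm = [c.strip().lower() for c in columns]
--     spatial = sum(_has_spatial_hint(s) for s in norm)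
--     norm_set = set(norm)
--     collapse = 1 if ({"lat", "latitude"} & norm_set) and ({"lon", "lng", "longitude"} & norm_set) else 0
--     return max(len(columns) - collapse, 0), max(spatial - collapse, 0)
-- ===== Notes on version B (the rewrite author's own statement) =====
-- stated objective: alternative
-- what changed: The spatial test is inverted from pattern-side to text-side matching: instead of scanning each name for each hint, B slides a window of each hint length over the normalized name and looks the window up in a frozenset of hints; the lat/lon flags become nonempty set-intersection tests against set(norm), and the paired decrement is applied arithmetically via a 0/1 collapse value instead of an if-branch mutating two counters.
import Mathlib
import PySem

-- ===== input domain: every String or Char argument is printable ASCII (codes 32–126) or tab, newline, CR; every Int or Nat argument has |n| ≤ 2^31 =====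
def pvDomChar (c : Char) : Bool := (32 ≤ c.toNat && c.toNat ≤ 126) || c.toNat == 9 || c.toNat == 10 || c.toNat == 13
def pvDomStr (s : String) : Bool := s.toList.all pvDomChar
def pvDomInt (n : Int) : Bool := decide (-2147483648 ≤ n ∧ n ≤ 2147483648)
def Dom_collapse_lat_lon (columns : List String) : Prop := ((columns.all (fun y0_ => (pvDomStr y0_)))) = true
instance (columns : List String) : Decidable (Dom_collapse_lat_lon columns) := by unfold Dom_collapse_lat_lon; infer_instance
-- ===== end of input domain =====

-- ===== PORT A =====
-- B replaces A's pattern-side search (scan s for each hint) by text-side matching: slide a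
-- window of each hint length over the normalized name and look it up in a hint set; the
-- lat/lon flags become nonempty set intersections. Objective: alternative (same order of cost).
def SPATIAL_HINTS : List String :=
  ["the_geom", "geom", "geometry", "shape", "latitude", "longitude",
   "lat", "lon", "point_x", "point_y", "x_coord", "y_coord"]

def is_spatial_col (name : String) : Bool :=
  let lower := PySem.Str.lower (PySem.Str.strip name)
  SPATIAL_HINTS.any (fun hint => hint == lower || PySem.Str.isIn hint lower)

def collapse_lat_lon (columns : List String) : Int × Int :=
  let lowered := columns.map (fun col => PySem.Str.lower (PySem.Str.strip col))
  let total_fields : Int := (columns.length : Int)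
  let spatial_fields : Int := ((columns.countP (fun col => is_spatial_col col) : Nat) : Int)
  let has_lat := lowered.any (fun col => col == "lat" || col == "latitude")
  let has_lon := lowered.any (fun col => col == "lon" || col == "lng" || col == "longitude")
  if has_lat && has_lon then
    (max (total_fields - 1) 0, max (spatial_fields - 1) 0)
  else
    (max total_fields 0, max spatial_fields 0)

-- ===== PORT B =====
def HINT_SET : PySem.Set String := PySem.Set.ofList SPATIAL_HINTS

def HINT_LENGTHS : List Int := [3, 4, 5, 7, 8, 9]  -- = sorted({len(h) for h in SPATIAL_HINTS})

def has_spatial_hint (s : String) : Bool :=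
  HINT_LENGTHS.any (fun L =>
    (PySem.List.pyRange 0 (PySem.Str.len s - L + 1) 1).any (fun i =>
      HINT_SET.contains (PySem.Str.slice s (some i) (some (i + L)))))

def collapse_lat_lon_alt (columns : List String) : Int × Int :=
  let norm := columns.map (fun c => PySem.Str.lower (PySem.Str.strip c))
  let spatial : Int := (norm.map (fun s => if has_spatial_hint s then (1 : Int) else 0)).sum
  let normSet : PySem.Set String := PySem.Set.ofList norm
  -- Python's 'if X & S and Y & S' (truthiness of the intersections) ported as nonempty checks
  let collapse : Int :=
    if !(PySem.Set.inter (PySem.Set.ofList ["lat", "latitude"]) normSet).isEmpty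
       && !(PySem.Set.inter (PySem.Set.ofList ["lon", "lng", "longitude"]) normSet).isEmpty
    then 1 else 0
  (max ((columns.length : Int) - collapse) 0, max (spatial - collapse) 0)

-- ===== PRECONDITION & SPEC =====
def Spec_collapse_lat_lon (columns : List String) (out : Int × Int) : Prop := out = collapse_lat_lon_alt columns
instance (columns : List String) (out : Int × Int) : Decidable (Spec_collapse_lat_lon columns out) := by unfold Spec_collapse_lat_lon; infer_instance

-- ===== CLAIM (what is proved, stated in full; the proofs are below) =====
def Claim_equal_collapse_lat_lon : Prop := ∀ (columns : List String), Dom_collapse_lat_lon columns → Spec_collapse_lat_lon columns (collapse_lat_lon columns)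

-- ===== LEMMAS AND PROOFS =====

-- every hint's length is in HINT_LENGTHS, and every listed length is positive
theorem hint_len_mem : ∀ h ∈ SPATIAL_HINTS, ((h.toList.length : Int)) ∈ HINT_LENGTHS := by decide

theorem hint_len_pos : ∀ L ∈ HINT_LENGTHS, 0 < L := by decide

-- A's 'hint == s or hint in s' collapses to 'hint in s'
theorem hint_test_eq (hint s : String) :
    (hint == s || PySem.Str.isIn hint s) = PySem.Str.isIn hint s := by
  by_cases h : hint = s
  · subst h
    have hin : PySem.Str.isIn hint hint = true := (PySem.Str.isIn_iff_infix hint hint).mpr (List.infix_refl _)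
    simpa using hin
  · simp [h]

-- B's windowed set lookup finds exactly the names some hint occurs in
theorem has_spatial_hint_eq (s : String) :
    has_spatial_hint s = SPATIAL_HINTS.any (fun hint => hint == s || PySem.Str.isIn hint s) := by
  simp only [hint_test_eq]
  rw [Bool.eq_iff_iff]
  simp only [has_spatial_hint, List.any_eq_true, PySem.List.mem_pyRange_one]
  constructor
  · rintro ⟨L, hL, i, ⟨hi0, hilt⟩, hc⟩
    have hmem : PySem.Str.slice s (some i) (some (i + L)) ∈ SPATIAL_HINTS := by
      have := (List.contains_iff_mem).mp hc
      exact (PySem.Set.mem_ofList SPATIAL_HINTS _).mp this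
    refine ⟨_, hmem, ?_⟩
    rw [PySem.Str.isIn_iff_infix, PySem.Str.toList_slice, PySem.Chars.slice_eq_listSlice]
    have hL0 : (0 : Int) < L := hint_len_pos L hL
    rw [PySem.List.slice_toNat _ hi0 (by omega)]
    exact ((List.take_prefix _ _).isInfix).trans ((List.drop_suffix _ _).isInfix)
  · rintro ⟨h, hh, hin⟩
    obtain ⟨pre, suf, hsp⟩ := (PySem.Str.isIn_iff_infix h s).mp hin
    have hlen : pre.length + h.toList.length + suf.length = s.toList.length := by
      have := congrArg List.length hsp
      rw [List.length_append, List.length_append] at this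
      exact this
    refine ⟨(h.toList.length : Int), hint_len_mem h hh, (pre.length : Int), ⟨by positivity, ?_⟩, ?_⟩
    · rw [PySem.Str.len_eq]; omega
    · apply List.contains_iff_mem.mpr
      apply (PySem.Set.mem_ofList SPATIAL_HINTS _).mpr
      have heq : PySem.Str.slice s (some (pre.length : Int)) (some ((pre.length : Int) + (h.toList.length : Int))) = h := by
        apply String.toList_inj.mp
        rw [PySem.Str.toList_slice, PySem.Chars.slice_eq_listSlice, PySem.List.slice_natCast_add,
            ← hsp, List.append_assoc, List.drop_left, List.take_left]
      rw [heq]; exact hh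

-- the nonempty-intersection flag equals A's any-scan
theorem inter_flag (keys norm : List String) :
    (!(PySem.Set.inter (PySem.Set.ofList keys) (PySem.Set.ofList norm)).isEmpty)
      = norm.any (fun s => keys.contains s) := by
  rw [Bool.eq_iff_iff]
  simp only [Bool.not_eq_eq_eq_not, Bool.not_true, List.isEmpty_eq_false_iff_exists_mem,
    List.any_eq_true, List.contains_iff_mem]
  constructor
  · rintro ⟨x, hx⟩
    have := (PySem.Set.mem_inter _ _ x).mp hx
    exact ⟨x, (PySem.Set.mem_ofList _ _).mp this.2, (PySem.Set.mem_ofList _ _).mp this.1⟩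
  · rintro ⟨x, hx, hk⟩
    exact ⟨x, (PySem.Set.mem_inter _ _ x).mpr
      ⟨(PySem.Set.mem_ofList _ _).mpr hk, (PySem.Set.mem_ofList _ _).mpr hx⟩⟩

-- the two membership predicates A and B use for the flags agree pointwise
theorem pair_pred_eq :
    (fun (s : String) => (["lat", "latitude"] : List String).contains s)
      = (fun (s : String) => s == "lat" || s == "latitude") := by
  funext s; by_cases h1 : s = "lat" <;> by_cases h2 : s = "latitude" <;> simp [h1, h2]

theorem triple_pred_eq :
    (fun (s : String) => (["lon", "lng", "longitude"] : List String).contains s)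
      = (fun (s : String) => s == "lon" || s == "lng" || s == "longitude") := by
  funext s
  by_cases h1 : s = "lon" <;> by_cases h2 : s = "lng" <;> by_cases h3 : s = "longitude" <;>
    simp [h1, h2, h3]

-- the window test composed with normalization is A's is_spatial_col
theorem comp_eq :
    ((fun s => has_spatial_hint s) ∘ fun c => PySem.Str.lower (PySem.Str.strip c))
      = (fun col => is_spatial_col col) := by
  funext c
  simp only [Function.comp_apply, has_spatial_hint_eq, is_spatial_col]

-- ===== VERDICT (by name: the statement is the Claim_ definition above) =====
theorem collapse_lat_lon_spec : Claim_equal_collapse_lat_lon := by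
  intro columns _
  unfold Spec_collapse_lat_lon
  simp only [collapse_lat_lon, collapse_lat_lon_alt]
  rw [PySem.List.sum_map_ite_one_zero, inter_flag, inter_flag, List.countP_map, comp_eq,
      pair_pred_eq, triple_pred_eq]
  split_ifs with h
  · rfl
  · simp
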